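-- pv_equiv track=rewrite | github.com/Ash-K-1/sociobuzz | .ipynb_checkpoints/app-checkpoint.py | resolve_hashtag_from_raw
-- ===== SOURCE A (Python) =====
-- FALLBACK_HASHTAG = "#fyp"
--
-- def resolve_hashtag_from_raw(hashtags_raw, known_ht_set):
--     if not hashtags_raw or not str(hashtags_raw).strip():
--         return "#Other", False, None
--     all_tags = []
--     for p in [p.strip() for p in str(hashtags_raw).split(",")]:
--         tag = p if p.startswith("#") else f"#{p}"
--         if tag != "#": all_tags.append(tag)
--     for tag in all_tags:
--         if tag in known_ht_set:
--             return tag, (tag != all_tags[0]), all_tags[0]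
--     return FALLBACK_HASHTAG, True, all_tags[0] if all_tags else "#Other"
-- ===== SOURCE B (Python) =====
-- FALLBACK_HASHTAG = "#fyp"
--
-- def resolve_hashtag_from_raw(hashtags_raw, known_ht_set):
--     if not hashtags_raw or not str(hashtags_raw).strip():
--         return "#Other", False, None
--     first = None
--     hit = None
--     # walk the parts RIGHT-TO-LEFT, overwriting: the last writes win, so after the
--     # loop `first` is the leftmost valid tag and `hit` the leftmost known valid tag
--     for part in reversed(str(hashtags_raw).split(",")):
--         p = part.strip()
--         tag = p if p.startswith("#") else "#" + p
--         if tag != "#":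
--             first = tag
--             if tag in known_ht_set:
--                 hit = tag
--     if hit is not None:
--         return hit, hit != first, first
--     return FALLBACK_HASHTAG, True, first if first is not None else "#Other"
-- ===== Notes on version B (the rewrite author's own statement) =====
-- stated objective: alternative
-- what changed: Traverses the comma-separated parts right-to-left with two overwrite accumulators (leftmost valid tag, leftmost known tag) and decides once at the end, instead of building the all_tags list and scanning it left-to-right with an early return.
import Mathlib
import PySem

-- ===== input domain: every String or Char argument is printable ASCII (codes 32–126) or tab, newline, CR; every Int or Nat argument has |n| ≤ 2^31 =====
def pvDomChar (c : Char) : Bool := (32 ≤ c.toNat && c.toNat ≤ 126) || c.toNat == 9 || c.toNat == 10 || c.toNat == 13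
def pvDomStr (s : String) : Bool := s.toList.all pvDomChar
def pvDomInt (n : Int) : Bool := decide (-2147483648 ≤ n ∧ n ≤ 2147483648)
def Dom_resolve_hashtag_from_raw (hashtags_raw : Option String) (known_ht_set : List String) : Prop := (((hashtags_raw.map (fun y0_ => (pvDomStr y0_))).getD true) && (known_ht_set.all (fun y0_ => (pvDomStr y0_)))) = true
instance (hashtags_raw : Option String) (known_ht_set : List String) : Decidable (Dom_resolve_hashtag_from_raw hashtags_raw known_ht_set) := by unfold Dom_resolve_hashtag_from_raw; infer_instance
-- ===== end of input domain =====

-- B traverses the parts right-to-left with overwrite accumulators and decides once at the end, instead of A's build-list-then-scan with early return; objective: alternative (same cost, different traversal).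


-- ===== PORT A =====
-- the normalization both Pythons share: p = part.strip(); tag = p if p.startswith("#") else "#"+p
def pvTag (part : String) : String :=
  let p := PySem.Str.strip part
  if PySem.Str.startswith p "#" then p else "#" ++ p

-- A's second loop: for tag in all_tags: if tag in known_ht_set: return tag, tag != all_tags[0], all_tags[0]
def pvFindKnownA (first : String) (known : List String) : List String → String × Bool × Option String
  | [] => ("#fyp", true, some first)
  | t :: ts => if known.contains t then (t, decide (t ≠ first), some first) else pvFindKnownA first known ts

def resolve_hashtag_from_raw (hashtags_raw : Option String) (known_ht_set : List String) : String × Bool × Option String :=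
  match hashtags_raw with
  | none => ("#Other", false, none)
  | some s =>
    if s = "" ∨ PySem.Str.strip s = "" then ("#Other", false, none)
    else
      -- s.split(",") always succeeds for the non-empty separator ","; getD [] only totalizes
      let all_tags := ((PySem.Str.split? s ",").getD []).foldl (fun acc p =>
        let tag := pvTag p
        if tag ≠ "#" then acc ++ [tag] else acc) []
      match all_tags with
      | [] => ("#fyp", true, some "#Other")
      | f :: _ => pvFindKnownA f known_ht_set all_tags

-- ===== PORT B =====
-- B's loop over reversed(parts): overwrite (first, hit); last writes win
def pvRevLoop (known : List String) : Option String × Option String → List String → Option String × Option String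
  | st, [] => st
  | (first, hit), part :: ps =>
    let tag := pvTag part
    if tag ≠ "#" then
      pvRevLoop known (some tag, if known.contains tag then some tag else hit) ps
    else pvRevLoop known (first, hit) ps

def resolve_hashtag_from_raw_alt (hashtags_raw : Option String) (known_ht_set : List String) : String × Bool × Option String :=
  match hashtags_raw with
  | none => ("#Other", false, none)
  | some s =>
    if s = "" ∨ PySem.Str.strip s = "" then ("#Other", false, none)
    else
      let st := pvRevLoop known_ht_set (none, none) (((PySem.Str.split? s ",").getD []).reverse)
      match st.2 with
      | some h => (h, decide (some h ≠ st.1), st.1)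
      | none => ("#fyp", true, some (st.1.getD "#Other"))

-- ===== PRECONDITION & SPEC =====
def Spec_resolve_hashtag_from_raw (hashtags_raw : Option String) (known_ht_set : List String) (out : String × Bool × Option String) : Prop := out = resolve_hashtag_from_raw_alt hashtags_raw known_ht_set
instance (hashtags_raw : Option String) (known_ht_set : List String) (out : String × Bool × Option String) : Decidable (Spec_resolve_hashtag_from_raw hashtags_raw known_ht_set out) := by unfold Spec_resolve_hashtag_from_raw; infer_instance

-- ===== CLAIM (what is proved, stated in full; the proofs are below) =====
def Claim_equal_resolve_hashtag_from_raw : Prop := ∀ (hashtags_raw : Option String) (known_ht_set : List String), Dom_resolve_hashtag_from_raw hashtags_raw known_ht_set → Spec_resolve_hashtag_from_raw hashtags_raw known_ht_set (resolve_hashtag_from_raw hashtags_raw known_ht_set)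

-- ===== LEMMAS AND PROOFS =====
-- normalization of one part as an Option: none = dropped (bare "#"), some tag = kept
def pvNorm (part : String) : Option String :=
  if pvTag part = "#" then none else some (pvTag part)

-- B's accumulator step, on valid tags only
def pvFoldTags (known : List String) : Option String × Option String → List String → Option String × Option String
  | st, [] => st
  | (_, hit), t :: ts => pvFoldTags known (some t, if known.contains t then some t else hit) ts

theorem pvFoldl_eq_filterMap (ps : List String) (acc : List String) :
    ps.foldl (fun acc p =>
        let tag := pvTag p
        if tag ≠ "#" then acc ++ [tag] else acc) acc = acc ++ ps.filterMap pvNorm := by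
  induction ps generalizing acc with
  | nil => simp
  | cons p ps ih =>
    simp only [List.foldl_cons, List.filterMap_cons, pvNorm]
    by_cases h : pvTag p = "#"
    · simp only [h, ne_eq, not_true_eq_false, if_false, if_true, ih]
      simp [pvNorm]
    · simp only [h, ne_eq, not_false_eq_true, if_true, if_false, ih]
      simp [pvNorm, List.append_assoc]

theorem pvRevLoop_eq_foldTags (known : List String) (st : Option String × Option String) (ps : List String) :
    pvRevLoop known st ps = pvFoldTags known st (ps.filterMap pvNorm) := by
  induction ps generalizing st with
  | nil => rfl
  | cons p ps ih =>
    obtain ⟨f, h⟩ := st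
    simp only [pvRevLoop, List.filterMap_cons, pvNorm]
    by_cases hp : pvTag p = "#"
    · simp only [hp, ne_eq, not_true_eq_false, if_false]
      exact ih _
    · simp only [hp, ne_eq, not_false_eq_true, if_true]
      exact ih _

theorem pvFoldTags_append (known : List String) (st : Option String × Option String) (l1 l2 : List String) :
    pvFoldTags known st (l1 ++ l2) = pvFoldTags known (pvFoldTags known st l1) l2 := by
  induction l1 generalizing st with
  | nil => rfl
  | cons t ts ih => obtain ⟨f, h⟩ := st; simp only [List.cons_append, pvFoldTags]; exact ih _

-- folding the reversed tag list yields (leftmost tag, leftmost known tag)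
theorem pvFoldTags_reverse (known : List String) (st : Option String × Option String) (tags : List String) :
    pvFoldTags known st tags.reverse =
      ((tags.head?).elim st.1 some,
       (tags.find? (fun t => known.contains t)).elim st.2 some) := by
  induction tags generalizing st with
  | nil => cases st; rfl
  | cons t ts ih =>
    rw [List.reverse_cons, pvFoldTags_append, ih]
    simp only [pvFoldTags, List.head?_cons, List.find?_cons, Option.elim_some]
    by_cases hk : t ∈ known
    · simp [hk]
    · simp [hk]

theorem pvFindKnownA_eq_find (first : String) (known : List String) (l : List String) :
    pvFindKnownA first known l =
      match l.find? (fun t => known.contains t) with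
      | some t => (t, decide (t ≠ first), some first)
      | none => ("#fyp", true, some first) := by
  induction l with
  | nil => rfl
  | cons t ts ih =>
    simp only [pvFindKnownA, List.find?_cons]
    by_cases hk : t ∈ known
    · simp [hk]
    · simp [hk, ih]

-- ===== VERDICT (by name: the statement is the Claim_ definition above) =====
theorem resolve_hashtag_from_raw_spec : Claim_equal_resolve_hashtag_from_raw := by
  intro hashtags_raw known _
  unfold Spec_resolve_hashtag_from_raw resolve_hashtag_from_raw resolve_hashtag_from_raw_alt
  match hashtags_raw with
  | none => rfl
  | some s =>
    by_cases hg : s = "" ∨ PySem.Str.strip s = ""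
    · simp [hg]
    · simp only [hg, if_false]
      rw [pvFoldl_eq_filterMap, List.nil_append, pvRevLoop_eq_foldTags,
        List.filterMap_reverse, pvFoldTags_reverse]
      cases hL : List.filterMap pvNorm ((PySem.Str.split? s ",").getD []) with
      | nil => rfl
      | cons f rest =>
        simp only [pvFindKnownA_eq_find]
        cases hF : List.find? (fun t => known.contains t) (f :: rest) with
        | none => rfl
        | some t =>
          simp only [List.head?_cons, Option.elim_some]
          by_cases ht : t = f <;> simp [ht]
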